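-- pv_equiv track=rewrite | github.com/eluizaTsuda/uoft-python | w7_tuples_dict.py | get_diagonal_and_non_diagonal12a
-- ===== SOURCE A (Python) =====
-- def get_diagonal_and_non_diagonal12a(L):
--     '''(list of list of int) -> tuple of (list of int, list of int)
--
--     Return a tuple where the first item is a list of the values on the
--     diagonal of square nested list L and the second item is a list of the rest
--     of the values in L.
--
--     >>> get_diagonal_and_non_diagonal12a([[1,  3,  5], [2,  4,  5], [4,  0,  8]])
--     ([1, 4, 8], [3, 5, 2, 5, 4, 0])
--     '''
--
--     diagonal = []
--     non_diagonal = []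
--     for row in range(len(L)):
--         for col in range(len(L)):
--
--             # CODE MISSING HERE
--             if row == col:
--                 diagonal.append(L[row][col])
--             elif row != col:
--                 non_diagonal.append(L[row][col])
--
--     return (diagonal, non_diagonal)
-- ===== SOURCE B (Python) =====
-- def get_diagonal_and_non_diagonal12a(L):
--     diagonal = []
--     non_diagonal = []
--     n = len(L)
--     for i, row in enumerate(L):
--         diagonal.append(row[i])
--         non_diagonal.extend(row[:i] + row[i+1:n])
--     return (diagonal, non_diagonal)
-- ===== Notes on version B (the rewrite author's own statement) =====
-- stated objective: simpler
-- what changed: Replaces the nested per-cell index loop with a single row-level pass that reads the diagonal entry directly and slices out the rest of each row, removing the inner loop and the per-cell row==col branch (bulk slice copies instead of per-cell appends).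
import Mathlib
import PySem

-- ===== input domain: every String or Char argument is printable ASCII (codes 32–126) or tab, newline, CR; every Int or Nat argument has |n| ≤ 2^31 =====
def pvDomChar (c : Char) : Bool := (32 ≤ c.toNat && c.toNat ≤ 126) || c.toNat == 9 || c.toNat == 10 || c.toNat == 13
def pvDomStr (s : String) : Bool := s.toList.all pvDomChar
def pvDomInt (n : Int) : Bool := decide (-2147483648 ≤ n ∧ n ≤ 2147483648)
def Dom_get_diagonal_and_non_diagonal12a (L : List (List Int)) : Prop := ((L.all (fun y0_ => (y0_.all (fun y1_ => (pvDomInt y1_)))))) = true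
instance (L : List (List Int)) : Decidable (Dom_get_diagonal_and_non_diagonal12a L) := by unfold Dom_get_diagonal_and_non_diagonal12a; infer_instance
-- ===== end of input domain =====

-- B replaces A's nested per-cell loop with one row-level pass (diagonal indexed directly,
-- the rest of the row sliced out); objective: simpler. Equal wherever A returns.

-- ===== PORT A =====
-- for row in range(len(L)): for col in range(len(L)): if row == col: diag.append(L[row][col]) elif row != col: nd.append(L[row][col])
def get_diagonal_and_non_diagonal12a (L : List (List Int)) : List Int × List Int :=
  let n : Int := L.length
  (PySem.List.pyRange 0 n).foldl (fun acc row =>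
    (PySem.List.pyRange 0 n).foldl (fun acc col =>
      if row == col then
        (acc.1 ++ [PySem.List.pyGetD (PySem.List.pyGetD L row []) col 0], acc.2)
      else if row != col then
        (acc.1, acc.2 ++ [PySem.List.pyGetD (PySem.List.pyGetD L row []) col 0])
      else acc) acc) ([], [])

-- ===== PORT B =====
-- for i, row in enumerate(L): diag.append(row[i]); nd.extend(row[:i] + row[i+1:n])
def get_diagonal_and_non_diagonal12a_alt (L : List (List Int)) : List Int × List Int :=
  let n : Int := L.length
  (PySem.List.enumerate L 0).foldl (fun acc p =>
    (acc.1 ++ [PySem.List.pyGetD p.2 p.1 0],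
     acc.2 ++ (PySem.List.slice p.2 none (some p.1) ++
               PySem.List.slice p.2 (some (p.1 + 1)) (some n)))) ([], [])

-- ===== PRECONDITION & SPEC =====
-- Pre_ excludes exactly the inputs on which A raises IndexError: some row shorter than len(L).
def Pre_get_diagonal_and_non_diagonal12a (L : List (List Int)) : Prop :=
  ∀ r ∈ L, L.length ≤ r.length
instance (L : List (List Int)) : Decidable (Pre_get_diagonal_and_non_diagonal12a L) := by unfold Pre_get_diagonal_and_non_diagonal12a; infer_instance
def pvWitness_get_diagonal_and_non_diagonal12a : List (List Int) := [[1, 3, 5], [2, 4, 5], [4, 0, 8]]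
def Spec_get_diagonal_and_non_diagonal12a (L : List (List Int)) (out : List Int × List Int) : Prop := out = get_diagonal_and_non_diagonal12a_alt L
instance (L : List (List Int)) (out : List Int × List Int) : Decidable (Spec_get_diagonal_and_non_diagonal12a L out) := by unfold Spec_get_diagonal_and_non_diagonal12a; infer_instance

-- ===== CLAIM (what is proved, stated in full; the proofs are below) =====
def Claim_equal_get_diagonal_and_non_diagonal12a : Prop := ∀ (L : List (List Int)), Dom_get_diagonal_and_non_diagonal12a L → Pre_get_diagonal_and_non_diagonal12a L → Spec_get_diagonal_and_non_diagonal12a L (get_diagonal_and_non_diagonal12a L)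

-- ===== LEMMAS AND PROOFS =====

-- every pair produced by enumerate is (index, element at that index)
lemma pv_mem_enumerate {α : Type} (d : α) :
    ∀ (L : List α) (s : Int) (p : Int × α), p ∈ PySem.List.enumerate L s → 0 ≤ s →
      s ≤ p.1 ∧ p.1 < s + L.length ∧ p.2 = PySem.List.pyGetD L (p.1 - s) d := by
  intro L
  induction L with
  | nil => intro s p hp _; simp [PySem.List.enumerate_nil] at hp
  | cons x xs ih =>
    intro s p hp hs
    rw [PySem.List.enumerate_cons] at hp
    rcases List.mem_cons.mp hp with h | h
    · subst h
      refine ⟨le_refl _, by simp, ?_⟩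
      rw [sub_self, PySem.List.pyGetD_of_nonneg _ _ (le_refl (0:Int))]
      rfl
    · obtain ⟨h1, h2, h3⟩ := ih (s+1) p h (by omega)
      refine ⟨by omega, by simp; omega, ?_⟩
      rw [h3, PySem.List.pyGetD_of_nonneg _ _ (by omega : (0:Int) ≤ p.1 - s),
          PySem.List.pyGetD_of_nonneg _ _ (by omega : (0:Int) ≤ p.1 - (s+1))]
      have : (p.1 - s).toNat = (p.1 - (s+1)).toNat + 1 := by omega
      rw [this]; rfl

-- A's inner column loop as an explicit pair of appends
lemma pv_inner (L : List (List Int)) (i : Int) (d nd : List Int) :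
    (PySem.List.pyRange 0 (L.length : Int)).foldl (fun acc col =>
      if i == col then
        (acc.1 ++ [PySem.List.pyGetD (PySem.List.pyGetD L i []) col 0], acc.2)
      else if i != col then
        (acc.1, acc.2 ++ [PySem.List.pyGetD (PySem.List.pyGetD L i []) col 0])
      else acc) (d, nd)
    = (d ++ (PySem.List.pyRange 0 (L.length : Int)).flatMap
            (fun c => if i = c then [PySem.List.pyGetD (PySem.List.pyGetD L i []) c 0] else []),
       nd ++ (PySem.List.pyRange 0 (L.length : Int)).flatMap
            (fun c => if i = c then [] else [PySem.List.pyGetD (PySem.List.pyGetD L i []) c 0])) := by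
  have hstep : (fun (acc : List Int × List Int) col =>
      if i == col then
        (acc.1 ++ [PySem.List.pyGetD (PySem.List.pyGetD L i []) col 0], acc.2)
      else if i != col then
        (acc.1, acc.2 ++ [PySem.List.pyGetD (PySem.List.pyGetD L i []) col 0])
      else acc)
      = fun acc c =>
        (acc.1 ++ (if i = c then [PySem.List.pyGetD (PySem.List.pyGetD L i []) c 0] else []),
         acc.2 ++ (if i = c then [] else [PySem.List.pyGetD (PySem.List.pyGetD L i []) c 0])) := by
    funext acc c
    by_cases h : i = c
    · simp [h]
    · simp [h, bne]
  rw [hstep,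
    PySem.List.foldl_prod_mk
      (f := fun a c => a ++ (if i = c then [PySem.List.pyGetD (PySem.List.pyGetD L i []) c 0] else []))
      (g := fun a c => a ++ (if i = c then [] else [PySem.List.pyGetD (PySem.List.pyGetD L i []) c 0])),
    PySem.List.foldl_append_eq_flatMap, PySem.List.foldl_append_eq_flatMap]

-- per-row contribution of A equals per-row contribution of B
lemma pv_row (L : List (List Int)) (hpre : Pre_get_diagonal_and_non_diagonal12a L)
    (i : Int) (h0 : 0 ≤ i) (h1 : i < (L.length : Int)) :
    (PySem.List.pyRange 0 (L.length : Int)).flatMap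
        (fun c => if i = c then [PySem.List.pyGetD (PySem.List.pyGetD L i []) c 0] else [])
      = [PySem.List.pyGetD (PySem.List.pyGetD L i []) i 0]
    ∧ (PySem.List.pyRange 0 (L.length : Int)).flatMap
        (fun c => if i = c then [] else [PySem.List.pyGetD (PySem.List.pyGetD L i []) c 0])
      = PySem.List.slice (PySem.List.pyGetD L i []) none (some i) ++
        PySem.List.slice (PySem.List.pyGetD L i []) (some (i + 1)) (some (L.length : Int)) := by
  set r := PySem.List.pyGetD L i [] with hr
  have hmem : r ∈ L := by
    rw [hr, PySem.List.pyGetD_eq_getElem L [] h0 h1]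
    exact List.getElem_mem _
  have hlen : L.length ≤ r.length := hpre r hmem
  have hsplit : PySem.List.pyRange 0 (L.length : Int)
      = PySem.List.pyRange 0 i ++ [i] ++ PySem.List.pyRange (i + 1) (L.length : Int) := by
    rw [PySem.List.pyRange_one_append 0 i ((L.length : Int)) h0 (by omega),
        PySem.List.pyRange_one_append i (i + 1) ((L.length : Int)) (by omega) (by omega),
        PySem.List.pyRange_one_singleton, List.append_assoc]
  have hleft : ∀ c ∈ PySem.List.pyRange 0 i, c < i := fun c hc =>
    (PySem.List.mem_pyRange_one.mp hc).2
  have hright : ∀ c ∈ PySem.List.pyRange (i + 1) ((L.length : Int)), i < c := fun c hc => by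
    have := (PySem.List.mem_pyRange_one.mp hc).1; omega
  have hgetTake : ∀ (m : Nat), (m : Int) ≤ (L.length : Int) →
      ∀ c ∈ PySem.List.pyRange 0 (m : Int) ++ PySem.List.pyRange 0 0, True := fun _ _ _ _ => trivial
  constructor
  · rw [hsplit, List.flatMap_append, List.flatMap_append]
    have e1 : (PySem.List.pyRange 0 i).flatMap
        (fun c => if i = c then [PySem.List.pyGetD r c 0] else []) = [] :=
      List.flatMap_eq_nil_iff.mpr (fun c hc => by
        have := hleft c hc; simp [show ¬ i = c by omega])
    have e3 : (PySem.List.pyRange (i + 1) ((L.length : Int))).flatMap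
        (fun c => if i = c then [PySem.List.pyGetD r c 0] else []) = [] :=
      List.flatMap_eq_nil_iff.mpr (fun c hc => by
        have := hright c hc; simp [show ¬ i = c by omega])
    simp [e1, e3]
  · rw [hsplit, List.flatMap_append, List.flatMap_append]
    have e2 : ([i] : List Int).flatMap
        (fun c => if i = c then [] else [PySem.List.pyGetD r c 0]) = [] := by simp
    have eL : (PySem.List.pyRange 0 i).flatMap
        (fun c => if i = c then [] else [PySem.List.pyGetD r c 0])
        = PySem.List.slice r none (some i) := by
      rw [List.flatMap_congr (g := fun c => [PySem.List.pyGetD r c 0])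
            (fun c hc => by have := hleft c hc; simp [show ¬ i = c by omega]),
          ← List.map_eq_flatMap]
      have hi : i.toNat ≤ r.length := by omega
      rw [PySem.List.slice_to r h0]
      have hlen' : ((r.take i.toNat).length : Int) = i := by
        simp [List.length_take]; omega
      calc (PySem.List.pyRange 0 i).map (fun c => PySem.List.pyGetD r c 0)
          = (PySem.List.pyRange 0 (((r.take i.toNat).length : Nat) : Int)).map
              (fun c => PySem.List.pyGetD (r.take i.toNat) c 0) := by
            rw [hlen']
            exact List.map_congr_left (fun c hc => by
              have h2 := PySem.List.mem_pyRange_one.mp hc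
              rw [PySem.List.pyGetD_eq_getElem r 0 h2.1 (by omega),
                  PySem.List.pyGetD_eq_getElem (r.take i.toNat) 0 h2.1 (by simp [List.length_take]; omega)]
              simp [List.getElem_take])
        _ = r.take i.toNat := PySem.List.map_pyGetD_pyRange_zero (r.take i.toNat) 0
    have eR : (PySem.List.pyRange (i + 1) ((L.length : Int))).flatMap
        (fun c => if i = c then [] else [PySem.List.pyGetD r c 0])
        = PySem.List.slice r (some (i + 1)) (some ((L.length : Int))) := by
      rw [List.flatMap_congr (g := fun c => [PySem.List.pyGetD r c 0])
            (fun c hc => by have := hright c hc; simp [show ¬ i = c by omega]),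
          ← List.map_eq_flatMap]
      rw [PySem.List.slice_toNat r (by omega) (by omega)]
      have hlenn : ((r.take L.length).length : Int) = (L.length : Int) := by
        simp [List.length_take]; omega
      calc (PySem.List.pyRange (i + 1) ((L.length : Int))).map (fun c => PySem.List.pyGetD r c 0)
          = (PySem.List.pyRange (i + 1) (((r.take L.length).length : Nat) : Int)).map
              (fun c => PySem.List.pyGetD (r.take L.length) c 0) := by
            rw [hlenn]
            exact List.map_congr_left (fun c hc => by
              have h2 := PySem.List.mem_pyRange_one.mp hc
              rw [PySem.List.pyGetD_eq_getElem r 0 (by omega) (by omega),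
                  PySem.List.pyGetD_eq_getElem (r.take L.length) 0 (by omega) (by simp [List.length_take]; omega)]
              simp [List.getElem_take])
        _ = (r.take L.length).drop (i + 1).toNat :=
            PySem.List.map_pyGetD_pyRange (r.take L.length) 0 (by omega)
        _ = (r.drop (i + 1).toNat).take ((L.length : Int).toNat - (i + 1).toNat) := by
            rw [List.drop_take]; congr 1
    rw [e2, eL, eR]; simp

-- ===== VERDICT (by name: the statement is the Claim_ definition above) =====
theorem get_diagonal_and_non_diagonal12a_spec : Claim_equal_get_diagonal_and_non_diagonal12a := by
  intro L _ hpre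
  unfold Spec_get_diagonal_and_non_diagonal12a
  unfold get_diagonal_and_non_diagonal12a get_diagonal_and_non_diagonal12a_alt
  simp only []
  -- A side: rewrite the outer loop body row by row using pv_inner + pv_row
  rw [PySem.List.foldl_congr_mem (PySem.List.pyRange 0 (L.length : Int)) _
      (fun acc i =>
        (acc.1 ++ [PySem.List.pyGetD (PySem.List.pyGetD L i []) i 0],
         acc.2 ++ (PySem.List.slice (PySem.List.pyGetD L i []) none (some i) ++
                   PySem.List.slice (PySem.List.pyGetD L i []) (some (i + 1)) (some (L.length : Int)))))
      ([], [])
      (by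
        intro acc i hi
        obtain ⟨d, nd⟩ := acc
        obtain ⟨h0, h1⟩ := PySem.List.mem_pyRange_one.mp hi
        rw [pv_inner L i d nd, (pv_row L hpre i h0 h1).1, (pv_row L hpre i h0 h1).2])]
  rw [PySem.List.foldl_prod_mk
      (f := fun a i => a ++ [PySem.List.pyGetD (PySem.List.pyGetD L i []) i 0])
      (g := fun a i => a ++ (PySem.List.slice (PySem.List.pyGetD L i []) none (some i) ++
                 PySem.List.slice (PySem.List.pyGetD L i []) (some (i + 1)) (some (L.length : Int)))),
    PySem.List.foldl_append_eq_flatMap, PySem.List.foldl_append_eq_flatMap]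
  -- B side
  rw [PySem.List.foldl_prod_mk
      (f := fun (a : List Int) (p : Int × List Int) => a ++ [PySem.List.pyGetD p.2 p.1 0])
      (g := fun (a : List Int) (p : Int × List Int) => a ++ (PySem.List.slice p.2 none (some p.1) ++
                 PySem.List.slice p.2 (some (p.1 + 1)) (some (L.length : Int)))),
    PySem.List.foldl_append_eq_flatMap, PySem.List.foldl_append_eq_flatMap]
  -- replace each enumerate pair (i, row) by (i, L[i]) and re-index by the range of first components
  have hsub : ∀ (p : Int × List Int), p ∈ PySem.List.enumerate L 0 →
      p.2 = PySem.List.pyGetD L p.1 [] := by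
    intro p hp
    have h := pv_mem_enumerate ([] : List Int) L 0 p hp (le_refl 0)
    simpa using h.2.2
  have eD : (PySem.List.enumerate L 0).flatMap
        (fun p => [PySem.List.pyGetD p.2 p.1 0])
      = (PySem.List.pyRange 0 (L.length : Int)).flatMap
        (fun i => [PySem.List.pyGetD (PySem.List.pyGetD L i []) i 0]) := by
    rw [List.flatMap_congr
        (g := fun p => [PySem.List.pyGetD (PySem.List.pyGetD L p.1 []) p.1 0])
        (fun p hp => by rw [hsub p hp]),
      ← List.flatMap_map (fun p : Int × List Int => p.1)
        (fun i => [PySem.List.pyGetD (PySem.List.pyGetD L i []) i 0]),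
      PySem.List.map_fst_enumerate]
    norm_num
  have eN : (PySem.List.enumerate L 0).flatMap
        (fun p => PySem.List.slice p.2 none (some p.1) ++
                  PySem.List.slice p.2 (some (p.1 + 1)) (some (L.length : Int)))
      = (PySem.List.pyRange 0 (L.length : Int)).flatMap
        (fun i => PySem.List.slice (PySem.List.pyGetD L i []) none (some i) ++
                  PySem.List.slice (PySem.List.pyGetD L i []) (some (i + 1)) (some (L.length : Int))) := by
    rw [List.flatMap_congr
        (g := fun p => PySem.List.slice (PySem.List.pyGetD L p.1 []) none (some p.1) ++
                  PySem.List.slice (PySem.List.pyGetD L p.1 []) (some (p.1 + 1)) (some (L.length : Int)))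
        (fun p hp => by rw [hsub p hp]),
      ← List.flatMap_map (fun p : Int × List Int => p.1)
        (fun i => PySem.List.slice (PySem.List.pyGetD L i []) none (some i) ++
                  PySem.List.slice (PySem.List.pyGetD L i []) (some (i + 1)) (some (L.length : Int))),
      PySem.List.map_fst_enumerate]
    norm_num
  rw [eD, eN]
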